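-- pv_equiv track=rewrite | github.com/minhman293/hd-epic-research | scripts/disfluency_detector.py | check_for_skipped_step
-- ===== SOURCE A (Python) =====
-- CRITICAL_STEPS = [
--     'turn-on(stove)',
--     'add(water)',
--     'close(fridge)',
--     'insert(capsule)'  # Added for your Nespresso deep-dive
-- ]
--
-- def check_for_skipped_step(action_history, recipe_template):
--     """
--     Improved: Checks if a 'Critical Step' was missed.
--     Instead of checking index i vs i, we check if the user has moved
--     passed a critical requirement without doing it.
--     """
--     if not action_history or not recipe_template:
--         return False
--
--     current_action = action_history[-1]
--
--     # Find where we are in the recipe template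
--     try:
--         current_step_idx = recipe_template.index(current_action)
--     except ValueError:
--         return False # User is doing a 'background' action not in template
--
--     # Look at all steps that should have happened BEFORE this one
--     prior_steps = recipe_template[:current_step_idx]
--
--     for step in prior_steps:
--         if step in CRITICAL_STEPS and step not in action_history:
--             return True # Found a critical step that was never performed
--
--     return False
-- ===== SOURCE B (Python) =====
-- CRITICAL_STEPS = [
--     'turn-on(stove)',
--     'add(water)',
--     'close(fridge)',
--     'insert(capsule)'
-- ]
--
-- def check_for_skipped_step(action_history, recipe_template):
--     if not action_history or not recipe_template:
--         return False
--     try: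
--         idx = recipe_template.index(action_history[-1])
--     except ValueError:
--         return False
--     # Invert the iteration: instead of scanning the prior portion of the
--     # template, check each of the (constantly many) critical requirements:
--     # it was skipped iff it occurs in the template strictly before where we
--     # are now and was never performed.
--     return any(
--         c not in action_history
--         and c in recipe_template
--         and recipe_template.index(c) < idx
--         for c in CRITICAL_STEPS
--     )
-- ===== Notes on version B (the rewrite author's own statement) =====
-- stated objective: alternative
-- what changed: The iteration is inverted: A scans the prior slice of the recipe template testing each step for criticality and absence, while B never slices or scans the template portion at all - it loops over the constant CRITICAL_STEPS list and decides each by a positional comparison of first-occurrence indices (recipe_template.index(c) < idx) plus an absence test.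
import Mathlib
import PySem

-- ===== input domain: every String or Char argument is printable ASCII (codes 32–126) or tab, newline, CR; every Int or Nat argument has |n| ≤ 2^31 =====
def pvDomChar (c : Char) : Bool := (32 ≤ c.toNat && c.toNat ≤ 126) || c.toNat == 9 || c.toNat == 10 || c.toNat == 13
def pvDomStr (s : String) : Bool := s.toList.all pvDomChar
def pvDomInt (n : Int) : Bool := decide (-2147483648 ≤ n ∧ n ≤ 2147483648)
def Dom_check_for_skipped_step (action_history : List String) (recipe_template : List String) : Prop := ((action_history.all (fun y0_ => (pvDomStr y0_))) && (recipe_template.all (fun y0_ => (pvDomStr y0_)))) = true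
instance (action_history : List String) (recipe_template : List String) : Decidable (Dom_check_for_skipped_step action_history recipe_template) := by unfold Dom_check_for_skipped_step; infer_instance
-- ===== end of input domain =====

-- ===== PORT A =====

-- B inverts the iteration: instead of scanning the prior slice of the template,
-- it loops over the constant CRITICAL_STEPS list and decides each requirement by a
-- first-occurrence index comparison and an absence test (alternative decomposition).

def CRITICAL_STEPS : List String :=
  ["turn-on(stove)", "add(water)", "close(fridge)", "insert(capsule)"]

-- the 'for step in prior_steps' loop of A, short-circuiting on the first hit
def priorScan (prior : List String) (action_history : List String) : Bool :=
  match prior with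
  | [] => false
  | step :: rest =>
      if CRITICAL_STEPS.contains step && !(action_history.contains step) then true
      else priorScan rest action_history

def check_for_skipped_step (action_history : List String) (recipe_template : List String) : Bool :=
  if action_history.isEmpty || recipe_template.isEmpty then false
  else
    match PySem.List.pyGet? action_history (-1) with
    | none => false
    | some current_action =>
      match PySem.List.index? recipe_template current_action with
      | none => false
      | some current_step_idx =>
        let prior_steps := PySem.List.slice recipe_template none (some (current_step_idx : Int))
        priorScan prior_steps action_history

-- ===== PORT B =====
-- 'c in recipe_template and recipe_template.index(c) < idx' for one critical step
def criticalBefore (recipe_template : List String) (idx : Nat) (c : String) : Bool :=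
  match PySem.List.index? recipe_template c with
  | none => false
  | some j => decide (j < idx)

def check_for_skipped_step_alt (action_history : List String) (recipe_template : List String) : Bool :=
  if action_history.isEmpty || recipe_template.isEmpty then false
  else
    match PySem.List.pyGet? action_history (-1) with
    | none => false
    | some current_action =>
      match PySem.List.index? recipe_template current_action with
      | none => false
      | some idx =>
        CRITICAL_STEPS.any (fun c =>
          !(action_history.contains c) && criticalBefore recipe_template idx c)

-- ===== PRECONDITION & SPEC =====
def Spec_check_for_skipped_step (action_history : List String) (recipe_template : List String) (out : Bool) : Prop := out = check_for_skipped_step_alt action_history recipe_template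
instance (action_history : List String) (recipe_template : List String) (out : Bool) : Decidable (Spec_check_for_skipped_step action_history recipe_template out) := by unfold Spec_check_for_skipped_step; infer_instance

-- ===== CLAIM =====
def Claim_equal_check_for_skipped_step : Prop := ∀ (action_history : List String) (recipe_template : List String), Dom_check_for_skipped_step action_history recipe_template → Spec_check_for_skipped_step action_history recipe_template (check_for_skipped_step action_history recipe_template)

-- ===== LEMMAS AND PROOFS =====

lemma priorScan_eq_exists (l ah : List String) :
    priorScan l ah = decide (∃ s ∈ l, s ∈ CRITICAL_STEPS ∧ s ∉ ah) := by
  induction l with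
  | nil => simp [priorScan]
  | cons x rest ih =>
      simp only [priorScan, ih]
      by_cases hc : x ∈ CRITICAL_STEPS <;> by_cases ha : x ∈ ah <;>
        simp [hc, ha]

-- membership in the prior slice ↔ the first occurrence lies strictly before idx
lemma mem_take_iff_index_lt (rt : List String) (s : String) (n : Nat) :
    s ∈ rt.take n ↔ ∃ j, PySem.List.index? rt s = some j ∧ j < n := by
  constructor
  · intro h
    have hmem : s ∈ rt := List.mem_of_mem_take h
    obtain ⟨j, hj⟩ := Option.isSome_iff_exists.mp
      ((PySem.List.index?_isSome_iff rt s).mpr hmem)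
    obtain ⟨hjlen, hget, hmin⟩ := PySem.List.getElem_of_index?_eq_some hj
    obtain ⟨k, hk, hkget⟩ := List.getElem_of_mem h
    have hkn : k < n := lt_of_lt_of_le hk (by simp [List.length_take])
    have hkrt : k < rt.length := by
      have := hk; simp [List.length_take] at this; omega
    have : ¬ k < j := by
      intro hlt
      exact hmin k hlt (by rw [← hkget, List.getElem_take])
    exact ⟨j, hj, by omega⟩
  · rintro ⟨j, hj, hjn⟩
    obtain ⟨hjlen, hget, -⟩ := PySem.List.getElem_of_index?_eq_some hj
    have hjt : j < (rt.take n).length := by simp [List.length_take]; omega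
    have : (rt.take n)[j]'hjt = s := by rw [List.getElem_take]; exact hget
    exact this ▸ List.getElem_mem hjt

lemma criticalBefore_eq (rt : List String) (idx : Nat) (c : String) :
    criticalBefore rt idx c = decide (c ∈ rt.take idx) := by
  unfold criticalBefore
  rcases h : PySem.List.index? rt c with _ | j
  · have : c ∉ rt := (PySem.List.index?_eq_none_iff rt c).mp h
    have : c ∉ rt.take idx := fun hm => this (List.mem_of_mem_take hm)
    simp [this]
  · simp only [mem_take_iff_index_lt, h]
    by_cases hlt : j < idx <;> simp [hlt]

lemma any_eq_scan (ah rt : List String) (idx : Nat) :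
    (CRITICAL_STEPS.any (fun c => !(ah.contains c) && criticalBefore rt idx c))
      = decide (∃ s ∈ rt.take idx, s ∈ CRITICAL_STEPS ∧ s ∉ ah) := by
  simp only [criticalBefore_eq]
  by_cases h : ∃ s ∈ rt.take idx, s ∈ CRITICAL_STEPS ∧ s ∉ ah
  · rcases h with ⟨s, ht, hc, ha⟩
    simp only [decide_eq_true (⟨s, ht, hc, ha⟩ : ∃ s ∈ rt.take idx, s ∈ CRITICAL_STEPS ∧ s ∉ ah)]
    rw [List.any_eq_true]
    exact ⟨s, hc, by simp [ha, ht]⟩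
  · simp only [decide_eq_false h]
    rw [Bool.eq_false_iff]
    intro hany
    rw [List.any_eq_true] at hany
    rcases hany with ⟨c, hc, hb⟩
    simp only [Bool.and_eq_true, Bool.not_eq_eq_eq_not, decide_eq_true_eq] at hb
    exact h ⟨c, hb.2, hc, by simpa using hb.1⟩

-- ===== VERDICT =====
theorem check_for_skipped_step_spec : Claim_equal_check_for_skipped_step := by
  intro ah rt _
  unfold Spec_check_for_skipped_step check_for_skipped_step check_for_skipped_step_alt
  split
  · rfl
  · cases PySem.List.pyGet? ah (-1) with
    | none => rfl
    | some cur =>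
        dsimp only
        cases PySem.List.index? rt cur with
        | none => rfl
        | some idx =>
            dsimp only
            rw [PySem.List.slice_to_natCast, priorScan_eq_exists, any_eq_scan]
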